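-- pv_equiv track=rewrite | github.com/nguyenbtkma/AntiAPI | src/services/payload/payload_service.py | tokenize_payload
-- ===== SOURCE A (Python) =====
-- char_groups = {
--     "operators": ["+", "-", "*", "/", "%", "×", "·", "**", "|"],
--     "brackets": ["{}", "[]", "()", "<>", "%%", "[%]", "(( ))", "{% %}"],
--     "quotes": ['"', "'", "`", "“”", "‘’"],
--     "whitespace": [" ", "\t", "\n", "%20"],
--     "delimiters": [";", ",", ".", ":"],
--     "numbers": [str(i) for i in range(10)],
--     "word": list("abcdefghijklmnopqrstuvwxyzABCDEFGHIJKLMNOPQRSTUVWXYZ")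
-- }
--
-- def tokenize_payload(payload):
--     tokens = []
--     i = 0
--
--     multi_char_operators = [op for op in char_groups["operators"] if len(op) > 1]
--
--     while i < len(payload):
--         found_multi = False
--         for op in multi_char_operators:
--             if payload[i:].startswith(op):
--                 tokens.append(("operators", op))
--                 i += len(op)
--                 found_multi = True
--                 break
--
--         if found_multi:
--             continue
--
--         char = payload[i]
--
--         group_name = None
--         for name, chars in char_groups.items():
--             if any(char in c for c in chars):
--                 group_name = name
--                 break
--
--         if char.isalpha():
--             word_start = i
--             while i < len(payload) and payload[i].isalpha():
--                 i += 1
--             word = payload[word_start:i]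
--             tokens.append(("word", word))
--             continue
--
--         if group_name:
--             tokens.append((group_name, char))
--         else:
--             tokens.append(("unknown", char))
--
--         i += 1
--
--     return tokens
-- ===== SOURCE B (Python) =====
-- char_groups = {
--     "operators": ["+", "-", "*", "/", "%", "×", "·", "**", "|"],
--     "brackets": ["{}", "[]", "()", "<>", "%%", "[%]", "(( ))", "{% %}"],
--     "quotes": ['"', "'", "`", "“”", "‘’"],
--     "whitespace": [" ", "\t", "\n", "%20"],
--     "delimiters": [";", ",", ".", ":"],
--     "numbers": [str(i) for i in range(10)],
--     "word": list("abcdefghijklmnopqrstuvwxyzABCDEFGHIJKLMNOPQRSTUVWXYZ")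
-- }
--
-- # inverted index: each character -> the FIRST group one of whose entries contains it
-- _group_of = {}
-- for _name, _entries in char_groups.items():
--     for _entry in _entries:
--         for _c in _entry:
--             if _c not in _group_of:
--                 _group_of[_c] = _name
--
--
-- def _kind(ch):
--     """run class of a character: alpha run, star run, or other."""
--     if ch.isalpha():
--         return "a"
--     if ch == "*":
--         return "s"
--     return "o"
--
--
-- def _emit(kind, run):
--     """tokens contributed by one maximal run of characters of one kind."""
--     if kind == "a":
--         return [("word", run)]
--     if kind == "s":
--         q, r = divmod(len(run), 2)
--         return [("operators", "**")] * q + [("operators", "*")] * r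
--     return [(_group_of.get(ch, "unknown"), ch) for ch in run]
--
--
-- def tokenize_payload(payload):
--     # pass 1: run-length segmentation by character kind
--     runs = []
--     cur_kind = None
--     cur = ""
--     for ch in payload:
--         k = _kind(ch)
--         if k == cur_kind:
--             cur += ch
--         else:
--             if cur_kind is not None:
--                 runs.append((cur_kind, cur))
--             cur_kind, cur = k, ch
--     if cur_kind is not None:
--         runs.append((cur_kind, cur))
--     # pass 2: emit tokens per run (star runs by arithmetic, others via the table)
--     tokens = []
--     for k, run in runs:
--         tokens.extend(_emit(k, run))
--     return tokens
-- ===== Notes on version B (the rewrite author's own statement) =====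
-- stated objective: alternative
-- what changed: Replaced A's scan-with-lookahead loop (a two-character operator probe plus a per-character linear scan of char_groups) by run-length segmentation into maximal alpha/star/other runs and a precomputed inverted char-to-group index: a star run of length L yields floor(L/2) double-star operator tokens plus a parity single-star token by arithmetic, and classification is a single dict lookup per character instead of an inner scan of all groups.
import Mathlib
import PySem

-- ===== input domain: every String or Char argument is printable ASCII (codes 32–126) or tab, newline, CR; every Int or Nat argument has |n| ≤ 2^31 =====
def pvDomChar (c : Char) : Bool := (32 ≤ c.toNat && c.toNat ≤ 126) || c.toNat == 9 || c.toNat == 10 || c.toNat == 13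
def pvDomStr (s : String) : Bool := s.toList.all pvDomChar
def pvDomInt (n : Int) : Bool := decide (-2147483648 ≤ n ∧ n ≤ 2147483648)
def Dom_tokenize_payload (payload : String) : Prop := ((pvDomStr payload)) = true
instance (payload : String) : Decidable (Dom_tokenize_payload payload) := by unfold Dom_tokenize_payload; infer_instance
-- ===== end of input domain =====

-- B replaces A's single scan-with-lookahead loop by run-length segmentation plus an
-- inverted char-to-group index: maximal runs of one character kind (alpha / star / other)
-- are found by a fold, a star run of length L becomes floor(L/2) double-star operator
-- tokens plus a parity single-star token by arithmetic, and classification is one dict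
-- lookup per character instead of A's per-character scan of char_groups.

-- shared module-level constant char_groups (dict → association list in insertion order)
def pvCharGroups : List (String × List String) := [
  ("operators", ["+", "-", "*", "/", "%", "×", "·", "**", "|"]),
  ("brackets", ["{}", "[]", "()", "<>", "%%", "[%]", "(( ))", "{% %}"]),
  ("quotes", ["\"", "'", "`", "“”", "‘’"]),
  ("whitespace", [" ", "\t", "\n", "%20"]),
  ("delimiters", [";", ",", ".", ":"]),
  ("numbers", ["0", "1", "2", "3", "4", "5", "6", "7", "8", "9"]),
  ("word", "abcdefghijklmnopqrstuvwxyzABCDEFGHIJKLMNOPQRSTUVWXYZ".toList.map (fun c => String.ofList [c]))]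

-- ===== PORT A =====
-- multi_char_operators = [op for op in char_groups["operators"] if len(op) > 1]
def pvMultiOps : List String :=
  ["+", "-", "*", "/", "%", "×", "·", "**", "|"].filter (fun op => 1 < op.toList.length)

-- A's while-loop; fuel = number of remaining loop iterations (each iteration consumes ≥ 1 char)
def pvLoopA : Nat → List Char → List (String × String)
  | 0, _ => []
  | _ + 1, [] => []
  | n + 1, c :: rest =>
    match pvMultiOps.find? (fun op => PySem.Chars.startswith (c :: rest) op.toList) with
    | some op => ("operators", op) :: pvLoopA n ((c :: rest).drop op.toList.length)
    | none =>
      -- group_name: first group whose entry list has a member containing char (Python `char in c`)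
      let group := pvCharGroups.find? (fun p => p.2.any (fun s => PySem.Str.isIn (String.ofList [c]) s))
      if PySem.Chars.isalpha c then
        ("word", String.ofList ((c :: rest).takeWhile PySem.Chars.isalpha)) ::
          pvLoopA n ((c :: rest).dropWhile PySem.Chars.isalpha)
      else
        match group with
        | some p => (p.1, String.ofList [c]) :: pvLoopA n rest
        | none => ("unknown", String.ofList [c]) :: pvLoopA n rest

def tokenize_payload (payload : String) : List (String × String) :=
  pvLoopA payload.toList.length payload.toList

-- ===== PORT B =====
-- module-level inverted index _group_of: char -> first group one of whose entries contains it
def pvGroupOf : PySem.Dict Char String :=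
  pvCharGroups.foldl (fun d p =>
    p.2.foldl (fun d s =>
      s.toList.foldl (fun d c => if d.contains c then d else d.insert c p.1) d) d)
    PySem.Dict.empty

-- _kind(ch): run class of a character
def pvKind (ch : Char) : String :=
  if PySem.Chars.isalpha ch then "a" else if ch = '*' then "s" else "o"

-- _emit(kind, run): tokens contributed by one maximal run
def pvEmit (k : String) (run : List Char) : List (String × String) :=
  if k = "a" then [("word", String.ofList run)]
  else if k = "s" then
    List.replicate (run.length / 2) ("operators", "**") ++
      List.replicate (run.length % 2) ("operators", "*")
  else run.map (fun ch => (pvGroupOf.getD ch "unknown", String.ofList [ch]))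

-- body of B's segmentation loop (state: runs, cur_kind, cur)
def pvRunStep (st : List (String × List Char) × Option String × List Char) (ch : Char) :
    List (String × List Char) × Option String × List Char :=
  let k := pvKind ch
  if some k = st.2.1 then (st.1, st.2.1, st.2.2 ++ [ch])
  else
    match st.2.1 with
    | some k0 => (st.1 ++ [(k0, st.2.2)], some k, [ch])
    | none => (st.1, some k, [ch])

def tokenize_payload_alt (payload : String) : List (String × String) :=
  let st := payload.toList.foldl pvRunStep ([], none, [])
  let runs := match st.2.1 with
    | some k0 => st.1 ++ [(k0, st.2.2)]
    | none => st.1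
  runs.foldl (fun toks kr => toks ++ pvEmit kr.1 kr.2) []

-- ===== PRECONDITION & SPEC =====
def Spec_tokenize_payload (payload : String) (out : List (String × String)) : Prop := out = tokenize_payload_alt payload
instance (payload : String) (out : List (String × String)) : Decidable (Spec_tokenize_payload payload out) := by unfold Spec_tokenize_payload; infer_instance

-- ===== CLAIM (what is proved, stated in full; the proofs are below) =====
def Claim_equal_tokenize_payload : Prop := ∀ (payload : String), Dom_tokenize_payload payload → Spec_tokenize_payload payload (tokenize_payload payload)

-- ===== LEMMAS AND PROOFS =====

-- maximal-run segmentation, specified recursively (proof-side reference)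
def pvRunsSpec : List Char → List (String × List Char)
  | [] => []
  | c :: cs =>
    (pvKind c, c :: cs.takeWhile (fun x => pvKind x == pvKind c)) ::
      pvRunsSpec (cs.dropWhile (fun x => pvKind x == pvKind c))
termination_by l => l.length
decreasing_by
  have := List.length_dropWhile_le (p := fun x => pvKind x == pvKind c) (l := cs)
  simp; omega

def pvTokensOf (rs : List (String × List Char)) : List (String × String) :=
  rs.flatMap (fun kr => pvEmit kr.1 kr.2)

theorem pvMultiOps_eq : pvMultiOps = ["**"] := by decide

theorem pvStartswith_star2 (c : Char) (rest : List Char) :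
    PySem.Chars.startswith (c :: rest) ['*', '*'] = true ↔ c = '*' ∧ ∃ t, rest = '*' :: t := by
  rw [PySem.Chars.startswith_iff]
  constructor
  · intro h
    rcases h with ⟨t, ht⟩
    cases rest with
    | nil => simp at ht
    | cons c2 r2 =>
      obtain ⟨h1, h2, _⟩ : '*' = c ∧ '*' = c2 ∧ t = r2 := by simpa using ht
      exact ⟨h1.symm, r2, by rw [← h2]⟩
  · rintro ⟨rfl, t, rfl⟩
    exact ⟨t, rfl⟩

-- ==== the inverted index pvGroupOf agrees with A's first-group scan ====

theorem pv_inner1 (L : List Char) (n : String) (d : PySem.Dict Char String) (c : Char) :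
    (L.foldl (fun d ch => if d.contains ch then d else d.insert ch n) d).get? c
      = (d.get? c).or (if L.contains c then some n else none) := by
  induction L generalizing d with
  | nil => simp
  | cons c0 L ih =>
    rw [List.foldl_cons, ih]
    by_cases hc : c = c0
    · subst hc
      by_cases hcon : d.contains c = true
      · have hs2 : (d.get? c).isSome = true := by
          rw [← PySem.Dict.contains_eq_isSome_get?]; exact hcon
        obtain ⟨v, hv⟩ := Option.isSome_iff_exists.mp hs2
        rw [if_pos hcon, hv]
        simp
      · have hb : d.contains c = false := by simpa using hcon
        have hn : d.get? c = none := (PySem.Dict.get?_eq_none_iff_contains d c).mpr hb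
        rw [if_neg (by simp [hb]), PySem.Dict.get?_insert_self, hn]
        simp
    · have h2 : (if d.contains c0 = true then d else d.insert c0 n).get? c = d.get? c := by
        split
        · rfl
        · exact PySem.Dict.get?_insert_of_ne d n hc
      rw [h2]
      cases hg : d.get? c with
      | some v => simp
      | none => simp [hc]

theorem pv_inner2 (es : List String) (n : String) (d : PySem.Dict Char String) (c : Char) :
    (es.foldl (fun d s => s.toList.foldl (fun d ch => if d.contains ch then d else d.insert ch n) d) d).get? c
      = (d.get? c).or (if es.any (fun s => s.toList.contains c) then some n else none) := by
  induction es generalizing d with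
  | nil => simp
  | cons s es ih =>
    rw [List.foldl_cons, ih, pv_inner1]
    cases hg : d.get? c with
    | some v => simp
    | none =>
      by_cases hcs : c ∈ s.toList <;> simp [hcs]

theorem pv_outer (gs : List (String × List String)) (d : PySem.Dict Char String) (c : Char) :
    (gs.foldl (fun d p =>
        p.2.foldl (fun d s =>
          s.toList.foldl (fun d ch => if d.contains ch then d else d.insert ch p.1) d) d) d).get? c
      = (d.get? c).or ((gs.find? (fun p => p.2.any (fun s => s.toList.contains c))).map Prod.fst) := by
  induction gs generalizing d with
  | nil => simp
  | cons p gs ih =>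
    rw [List.foldl_cons, ih, pv_inner2]
    by_cases hp : (p.2.any (fun s => s.toList.contains c)) = true
    · rw [List.find?_cons_of_pos (by simpa using hp), if_pos hp]
      cases hg : d.get? c <;> rfl
    · rw [List.find?_cons_of_neg (by simpa using hp),
        if_neg (by simpa using hp)]
      cases hg : d.get? c <;> rfl

theorem pv_isIn_single (c : Char) (s : String) :
    PySem.Str.isIn (String.ofList [c]) s = s.toList.contains c := by
  rw [Bool.eq_iff_iff, PySem.Str.isIn_iff_infix]
  simp [List.singleton_infix_iff]

theorem pvTable_get? (c : Char) :
    pvGroupOf.get? c =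
      (pvCharGroups.find? (fun p => p.2.any (fun s => PySem.Str.isIn (String.ofList [c]) s))).map Prod.fst := by
  unfold pvGroupOf
  rw [pv_outer]
  have hfun : (fun (p : String × List String) => p.2.any fun s => s.toList.contains c)
      = (fun (p : String × List String) => p.2.any fun s => PySem.Str.isIn (String.ofList [c]) s) := by
    funext p
    exact congrArg _ (funext fun s => (pv_isIn_single c s).symm)
  rw [hfun]
  simp

-- A's per-character classification = one lookup in the inverted index
theorem pv_tok_eq (c : Char) :
    (match pvCharGroups.find? (fun p => p.2.any (fun s => PySem.Str.isIn (String.ofList [c]) s)) with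
      | some p => (p.1, String.ofList [c])
      | none => ("unknown", String.ofList [c]))
    = (pvGroupOf.getD c "unknown", String.ofList [c]) := by
  rw [PySem.Dict.getD_eq_get?_getD, pvTable_get?]
  cases h : pvCharGroups.find? (fun p => p.2.any (fun s => PySem.Str.isIn (String.ofList [c]) s)) <;> simp

-- ==== pvKind pointwise facts ====

theorem pvKind_star : pvKind '*' = "s" := by decide

theorem pvKind_alpha {c : Char} (h : PySem.Chars.isalpha c = true) : pvKind c = "a" := by
  simp [pvKind, h]

theorem pvKind_other {c : Char} (h1 : PySem.Chars.isalpha c = false) (h2 : c ≠ '*') :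
    pvKind c = "o" := by
  simp [pvKind, h1, h2]

theorem pvKindS_eq (x : Char) : (pvKind x == pvKind '*') = (x == '*') := by
  by_cases hx : x = '*'
  · subst hx; simp
  · have h2 : (x == '*') = false := by simp [hx]
    rw [h2, pvKind_star]
    by_cases ha : PySem.Chars.isalpha x = true
    · rw [pvKind_alpha ha]; decide
    · rw [pvKind_other (by simpa using ha) hx]; decide

theorem pvKindS'_eq (x : Char) : (pvKind x == ("s" : String)) = (x == '*') := by
  rw [← pvKind_star]; exact pvKindS_eq x

theorem pvKindA_eq (x : Char) : (pvKind x == ("a" : String)) = PySem.Chars.isalpha x := by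
  by_cases ha : PySem.Chars.isalpha x = true
  · rw [pvKind_alpha ha, ha]; decide
  · have ha' : PySem.Chars.isalpha x = false := by simpa using ha
    rw [ha']
    by_cases hx : x = '*'
    · subst hx; decide
    · rw [pvKind_other ha' hx]; decide

-- ==== takeWhile / dropWhile over an all-true prefix ====

theorem pv_tw_app {p : Char → Bool} (l1 l2 : List Char) (h : ∀ x ∈ l1, p x = true) :
    (l1 ++ l2).takeWhile p = l1 ++ l2.takeWhile p := by
  induction l1 with
  | nil => simp
  | cons a l1 ih =>
    have ha := h a (by simp)
    simp [ha, ih (fun x hx => h x (by simp [hx]))]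

theorem pv_dw_app {p : Char → Bool} (l1 l2 : List Char) (h : ∀ x ∈ l1, p x = true) :
    (l1 ++ l2).dropWhile p = l2.dropWhile p := by
  induction l1 with
  | nil => simp
  | cons a l1 ih =>
    have ha := h a (by simp)
    simp [ha, ih (fun x hx => h x (by simp [hx]))]

-- a nonempty all-kind-k prefix merges into the first run
theorem pvRunsSpec_prefix (cs cur' : List Char) (c0 : Char) (k : String)
    (h : ∀ x ∈ c0 :: cur', pvKind x = k) :
    pvRunsSpec ((c0 :: cur') ++ cs)
      = (k, (c0 :: cur') ++ cs.takeWhile (fun x => pvKind x == k)) ::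
          pvRunsSpec (cs.dropWhile (fun x => pvKind x == k)) := by
  have hk0 : pvKind c0 = k := h c0 (by simp)
  rw [List.cons_append, pvRunsSpec, hk0]
  have htw : (cur' ++ cs).takeWhile (fun x => pvKind x == k)
      = cur' ++ cs.takeWhile (fun x => pvKind x == k) :=
    pv_tw_app _ _ (fun x hx => by simp [h x (by simp [hx])])
  have hdw : (cur' ++ cs).dropWhile (fun x => pvKind x == k)
      = cs.dropWhile (fun x => pvKind x == k) :=
    pv_dw_app _ _ (fun x hx => by simp [h x (by simp [hx])])
  rw [htw, hdw]
  simp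

-- B's fold computes pvRunsSpec
theorem pv_foldl_runs : ∀ (cs : List Char) (runs : List (String × List Char)) (k : String) (cur : List Char),
    cur ≠ [] → (∀ x ∈ cur, pvKind x = k) →
    (match (cs.foldl pvRunStep (runs, some k, cur)).2.1 with
      | some k0 => (cs.foldl pvRunStep (runs, some k, cur)).1 ++ [(k0, (cs.foldl pvRunStep (runs, some k, cur)).2.2)]
      | none => (cs.foldl pvRunStep (runs, some k, cur)).1)
      = runs ++ pvRunsSpec (cur ++ cs) := by
  intro cs
  induction cs with
  | nil =>
    intro runs k cur hne hall
    obtain ⟨c0, cur', rfl⟩ := List.exists_cons_of_ne_nil hne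
    rw [List.foldl_nil, List.append_nil]
    rw [show ((c0 :: cur') : List Char) = (c0 :: cur') ++ ([] : List Char) by simp,
      pvRunsSpec_prefix _ _ _ _ hall]
    simp [pvRunsSpec]
  | cons ch cs ih =>
    intro runs k cur hne hall
    obtain ⟨c0, cur', rfl⟩ := List.exists_cons_of_ne_nil hne
    rw [List.foldl_cons]
    by_cases hk : pvKind ch = k
    · have hstep : pvRunStep (runs, some k, c0 :: cur') ch = (runs, some k, (c0 :: cur') ++ [ch]) := by
        simp [pvRunStep, hk]
      rw [hstep, ih runs k _ (by simp) (by
        intro x hx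
        rcases List.mem_append.mp hx with h1 | h1
        · exact hall x h1
        · simp at h1; subst h1; exact hk)]
      rw [List.append_assoc]
      rfl
    · have hstep : pvRunStep (runs, some k, c0 :: cur') ch
          = (runs ++ [(k, c0 :: cur')], some (pvKind ch), [ch]) := by
        simp only [pvRunStep]
        rw [if_neg (by simpa using hk)]
      rw [hstep, ih _ _ _ (by simp) (by simp)]
      rw [pvRunsSpec_prefix (ch :: cs) cur' c0 k hall]
      have hbf : (pvKind ch == k) = false := by simpa using hk
      simp [hbf]

-- ==== star-run arithmetic ====

theorem pvEmit_s_cons2 (a b : Char) (run : List Char) :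
    pvEmit "s" (a :: b :: run) = ("operators", "**") :: pvEmit "s" run := by
  simp only [pvEmit, if_neg (by decide : ¬ ("s" : String) = "a")]
  rw [List.length_cons, List.length_cons,
    show (run.length + 1 + 1) / 2 = run.length / 2 + 1 by omega,
    show (run.length + 1 + 1) % 2 = run.length % 2 by omega,
    List.replicate_succ]
  simp

theorem pv_split_star (t : List Char) :
    pvTokensOf (pvRunsSpec t)
      = pvEmit "s" (t.takeWhile (fun x => x == '*')) ++
          pvTokensOf (pvRunsSpec (t.dropWhile (fun x => x == '*'))) := by
  cases t with
  | nil => simp [pvRunsSpec, pvEmit]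
  | cons d t' =>
    by_cases hd : d = '*'
    · subst hd
      rw [pvRunsSpec, pvKind_star]
      simp only [pvKindS'_eq]
      simp only [List.takeWhile_cons, List.dropWhile_cons]
      simp [pvTokensOf]
    · have hb : (d == '*') = false := by simp [hd]
      simp only [List.takeWhile_cons, List.dropWhile_cons, hb]
      simp [pvEmit]

theorem pv_split_o (t : List Char) :
    pvTokensOf (pvRunsSpec t)
      = pvEmit "o" (t.takeWhile (fun x => pvKind x == "o")) ++
          pvTokensOf (pvRunsSpec (t.dropWhile (fun x => pvKind x == "o"))) := by
  cases t with
  | nil => simp [pvRunsSpec, pvEmit]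
  | cons d t' =>
    by_cases hk : pvKind d = "o"
    · rw [pvRunsSpec, hk]
      simp only [List.takeWhile_cons, List.dropWhile_cons, hk]
      simp [pvTokensOf, pvEmit]
    · have hb : (pvKind d == ("o" : String)) = false := by simpa using hk
      simp only [List.takeWhile_cons, List.dropWhile_cons, hb]
      simp [pvEmit]

-- A's loop computes the tokens of the maximal runs
theorem pv_loopA_eq : ∀ (n : Nat) (cs : List Char), cs.length ≤ n →
    pvLoopA n cs = pvTokensOf (pvRunsSpec cs) := by
  intro n
  induction n with
  | zero =>
    intro cs hlen
    have : cs = [] := List.eq_nil_of_length_eq_zero (by omega)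
    subst this; simp [pvLoopA, pvRunsSpec, pvTokensOf]
  | succ n ih =>
    intro cs hlen
    cases cs with
    | nil => simp [pvLoopA, pvRunsSpec, pvTokensOf]
    | cons c rest =>
      by_cases hsw : PySem.Chars.startswith (c :: rest) ['*', '*'] = true
      · -- '**' branch
        rcases (pvStartswith_star2 c rest).mp hsw with ⟨rfl, t, rfl⟩
        have hf : List.find? (fun op => PySem.Chars.startswith ('*' :: '*' :: t) op.toList) ["**"]
            = some "**" := List.find?_cons_of_pos (by simpa using hsw)
        have hd : ("**" : String).toList.length = 2 := by decide
        simp only [pvLoopA, pvMultiOps_eq, hf, hd, List.drop_succ_cons, List.drop_zero]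
        rw [ih t (by simp at hlen; omega), pvRunsSpec, pvKind_star]
        simp only [pvKindS'_eq]
        rw [show List.takeWhile (fun x => x == '*') ('*' :: t)
              = '*' :: List.takeWhile (fun x => x == '*') t from by simp,
          show List.dropWhile (fun x => x == '*') ('*' :: t)
              = List.dropWhile (fun x => x == '*') t from by simp]
        rw [show pvTokensOf (("s", '*' :: '*' :: List.takeWhile (fun x => x == '*') t) ::
              pvRunsSpec (List.dropWhile (fun x => x == '*') t))
            = pvEmit "s" ('*' :: '*' :: List.takeWhile (fun x => x == '*') t) ++
              pvTokensOf (pvRunsSpec (List.dropWhile (fun x => x == '*') t)) from by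
          simp [pvTokensOf]]
        rw [pvEmit_s_cons2, pv_split_star t]
        simp
      · have hfind : pvMultiOps.find? (fun op => PySem.Chars.startswith (c :: rest) op.toList)
            = none := by
          rw [pvMultiOps_eq]
          simp only [List.find?]
          rw [show PySem.Chars.startswith (c :: rest) ("**".toList) = false by
            simpa using hsw]
        by_cases hal : PySem.Chars.isalpha c = true
        · -- alpha-run branch
          simp only [pvLoopA, hfind, if_pos hal]
          rw [pvRunsSpec, pvKind_alpha hal]
          simp only [pvKindA_eq]
          have htw : (c :: rest).takeWhile PySem.Chars.isalpha
              = c :: rest.takeWhile PySem.Chars.isalpha := by simp [hal]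
          have hdw : (c :: rest).dropWhile PySem.Chars.isalpha
              = rest.dropWhile PySem.Chars.isalpha := by simp [hal]
          rw [htw, hdw, ih _ (le_trans (List.length_dropWhile_le _ _) (by simp at hlen; omega))]
          simp [pvTokensOf, pvEmit]
        · have hal' : PySem.Chars.isalpha c = false := by simpa using hal
          by_cases hstar : c = '*'
          · -- lone '*' branch
            subst hstar
            have hrest : rest.takeWhile (fun x => x == '*') = [] ∧
                rest.dropWhile (fun x => x == '*') = rest := by
              cases rest with
              | nil => simp
              | cons d t =>
                have hd : d ≠ '*' := by
                  intro h; subst h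
                  exact hsw ((pvStartswith_star2 _ _).mpr ⟨rfl, t, rfl⟩)
                simp [hd]
            simp only [pvLoopA, hfind, hal', Bool.false_eq_true, if_false]
            rw [show pvCharGroups.find?
                  (fun p => p.2.any (fun s => PySem.Str.isIn (String.ofList ['*']) s))
                = some ("operators", ["+", "-", "*", "/", "%", "×", "·", "**", "|"]) from by decide]
            rw [pvRunsSpec, pvKind_star]
            simp only [pvKindS'_eq]
            rw [hrest.1, hrest.2, ih rest (by simp at hlen; omega)]
            simp [pvTokensOf, pvEmit]
          · -- other single char branch
            simp only [pvLoopA, hfind, hal', Bool.false_eq_true, if_false]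
            rw [pvRunsSpec, pvKind_other hal' hstar]
            have hhead : ∀ (tl : List (String × List Char)),
                pvTokensOf ((("o" : String), c :: rest.takeWhile (fun x => pvKind x == "o")) :: tl)
                = (pvGroupOf.getD c "unknown", String.ofList [c]) ::
                    (pvEmit "o" (rest.takeWhile (fun x => pvKind x == "o")) ++ pvTokensOf tl) := by
              intro tl; simp [pvTokensOf, pvEmit]
            rw [hhead, ← pv_split_o, ← ih rest (by simp at hlen; omega), ← pv_tok_eq c]
            cases pvCharGroups.find? (fun p => p.2.any (fun s => PySem.Str.isIn (String.ofList [c]) s)) with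
            | some p => simp
            | none => simp

-- ===== VERDICT (by name: the statement is the Claim_ definition above) =====
theorem tokenize_payload_spec : Claim_equal_tokenize_payload := by
  intro payload _
  unfold Spec_tokenize_payload tokenize_payload tokenize_payload_alt
  cases hp : payload.toList with
  | nil => simp [pvLoopA]
  | cons c rest =>
    rw [List.foldl_cons]
    have hstep : pvRunStep ([], none, []) c = ([], some (pvKind c), [c]) := by
      simp [pvRunStep]
    rw [hstep]
    have hfold := pv_foldl_runs rest [] (pvKind c) [c] (by simp) (by simp)
    simp only [List.nil_append, List.singleton_append] at hfold
    rw [PySem.List.foldl_append_eq_flatMap, hfold]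
    rw [pv_loopA_eq (c :: rest).length (c :: rest) le_rfl]
    rfl
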